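-- pv_equiv track=rewrite | github.com/pulp-platform/gwaihir | experiments/multicast/model.py | nearest_divisors
-- ===== SOURCE A (Python) =====
-- from math import isqrt, sqrt, log2, ceil
--
-- def nearest_divisors(divisor, dividend):
--     from bisect import bisect_left
--
--     # 1) Enumerate all positive divisors of dividend
--     divs = set()
--     r = int(isqrt(int(dividend)))
--     for d in range(1, r + 1):
--         if dividend % d == 0:        # d divides dividend
--             divs.add(d)              # add the small factor
--             divs.add(dividend // d)  # add the paired large factor
--     divs = sorted(divs)              # sort them ascending
--
--     # 2) Binary search to locate where x would be inserted
--     i = bisect_left(divs, divisor)  # first index with divs[i] >= divisor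
--
--     # 3) Pick neighbors around divisor
--     lower = divs[i - 1] if i > 0 and divs[i - 1] <= divisor else None
--     upper = divs[i] if i < len(divs) else None
--     return lower, upper
-- ===== SOURCE B (Python) =====
-- from math import isqrt
--
-- def nearest_divisors(divisor, dividend):
--     # One pass over d = 1..isqrt(dividend): keep running accumulators instead of
--     # building, dedup-ing, sorting and bisecting a divisor list.
--     lower = None  # max divisor strictly below `divisor`
--     upper = None  # min divisor >= `divisor`
--     for d in range(1, int(isqrt(int(dividend))) + 1):
--         if dividend % d == 0:
--             for v in (d, dividend // d):
--                 if v < divisor: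
--                     if lower is None or lower < v:
--                         lower = v
--                 else:
--                     if upper is None or v < upper:
--                         upper = v
--     return lower, upper
-- ===== Notes on version B (the rewrite author's own statement) =====
-- stated objective: simpler
-- what changed: Replaces the set-build / sort / bisect_left pipeline with a single divisor-enumeration pass that maintains two running accumulators (max divisor < divisor, min divisor >= divisor), so no collection is ever materialised.
import Mathlib
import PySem

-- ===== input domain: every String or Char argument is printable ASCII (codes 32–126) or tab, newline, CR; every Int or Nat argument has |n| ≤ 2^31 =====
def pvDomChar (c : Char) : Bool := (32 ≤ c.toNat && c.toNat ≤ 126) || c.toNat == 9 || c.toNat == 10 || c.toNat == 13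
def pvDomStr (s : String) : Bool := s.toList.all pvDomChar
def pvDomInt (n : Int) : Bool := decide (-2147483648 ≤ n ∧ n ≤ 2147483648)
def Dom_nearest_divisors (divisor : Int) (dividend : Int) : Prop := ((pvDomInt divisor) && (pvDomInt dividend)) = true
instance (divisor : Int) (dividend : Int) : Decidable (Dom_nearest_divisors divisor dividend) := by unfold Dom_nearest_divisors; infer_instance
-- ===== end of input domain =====

-- B replaces A's set-build / sort / bisect pipeline by one enumeration pass with two
-- running accumulators (objective: simpler; equal O(√n) enumeration cost).

-- ===== PORT A =====
def nearest_divisors (divisor : Int) (dividend : Int) : Option Int × Option Int :=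
  -- r = int(isqrt(int(dividend))); Nat.sqrt is exact for the 0 ≤ dividend admitted by Pre_
  let r : Int := (Nat.sqrt dividend.toNat : Int)
  let divs : PySem.Set Int :=
    (PySem.List.pyRange 1 (r + 1) 1).foldl
      (fun s d =>
        if PySem.Int.mod dividend d = 0 then
          PySem.Set.add (PySem.Set.add s d) (PySem.Int.floordiv dividend d)
        else s)
      PySem.Set.empty
  let divsS : List Int := PySem.List.sorted divs (fun x => x) false
  let i : Nat := PySem.List.bisectLeft divsS divisor
  let lower : Option Int :=
    if 0 < i ∧ PySem.List.pyGetD divsS ((i : Int) - 1) 0 ≤ divisor then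
      some (PySem.List.pyGetD divsS ((i : Int) - 1) 0)
    else none
  let upper : Option Int :=
    if (i : Int) < PySem.List.len divsS then some (PySem.List.pyGetD divsS (i : Int) 0) else none
  (lower, upper)

-- ===== PORT B =====
-- 'if lower is None or lower < v: lower = v'
def ndOptMax (o : Option Int) (v : Int) : Option Int :=
  match o with
  | none => some v
  | some l => if l < v then some v else some l

-- 'if upper is None or v < upper: upper = v'
def ndOptMin (o : Option Int) (v : Int) : Option Int :=
  match o with
  | none => some v
  | some u => if v < u then some v else some u

-- body of the inner 'for v in (d, dividend // d)' loop
def ndUpd (divisor : Int) (st : Option Int × Option Int) (v : Int) : Option Int × Option Int :=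
  if v < divisor then (ndOptMax st.1 v, st.2) else (st.1, ndOptMin st.2 v)

def nearest_divisors_alt (divisor : Int) (dividend : Int) : Option Int × Option Int :=
  (PySem.List.pyRange 1 ((Nat.sqrt dividend.toNat : Int) + 1) 1).foldl
    (fun st d =>
      if PySem.Int.mod dividend d = 0 then
        ndUpd divisor (ndUpd divisor st d) (PySem.Int.floordiv dividend d)
      else st)
    (none, none)

-- ===== PRECONDITION & SPEC =====
-- Pre_ excludes dividend < 0, on which Python's isqrt raises ValueError in A (and in B).
def Pre_nearest_divisors (divisor : Int) (dividend : Int) : Prop := 0 ≤ dividend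
instance (divisor : Int) (dividend : Int) : Decidable (Pre_nearest_divisors divisor dividend) := by
  unfold Pre_nearest_divisors; infer_instance

def pvWitness_nearest_divisors : Int × Int := (5, 12)

def Spec_nearest_divisors (divisor : Int) (dividend : Int) (out : Option Int × Option Int) : Prop :=
  out = nearest_divisors_alt divisor dividend
instance (divisor : Int) (dividend : Int) (out : Option Int × Option Int) :
    Decidable (Spec_nearest_divisors divisor dividend out) := by
  unfold Spec_nearest_divisors; infer_instance

-- ===== CLAIM (what is proved, stated in full; the proofs are below) =====
def Claim_equal_nearest_divisors : Prop :=
  ∀ (divisor : Int) (dividend : Int), Dom_nearest_divisors divisor dividend →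
    Pre_nearest_divisors divisor dividend →
    Spec_nearest_divisors divisor dividend (nearest_divisors divisor dividend)

-- ===== LEMMAS AND PROOFS =====

-- the flattened candidate list produced by the enumeration loop
def ndCands (dividend : Int) (r : Int) : List Int :=
  (PySem.List.pyRange 1 (r + 1) 1).flatMap
    (fun d => if PySem.Int.mod dividend d = 0 then [d, PySem.Int.floordiv dividend d] else [])

-- A's set fold is Set.ofList of the candidate list
theorem nd_set_fold (dividend : Int) (L : List Int) (s : PySem.Set Int) :
    L.foldl
      (fun s d =>
        if PySem.Int.mod dividend d = 0 then
          PySem.Set.add (PySem.Set.add s d) (PySem.Int.floordiv dividend d)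
        else s) s
    = (L.flatMap
        (fun d => if PySem.Int.mod dividend d = 0 then [d, PySem.Int.floordiv dividend d] else [])).foldl
        PySem.Set.add s := by
  induction L generalizing s with
  | nil => rfl
  | cons x L ih =>
    by_cases h : PySem.Int.mod dividend x = 0 <;>
      simp [List.flatMap_cons, h, ih]

-- B's fold is a fold of ndUpd over the candidate list
theorem nd_alt_fold (divisor dividend : Int) (L : List Int) (st : Option Int × Option Int) :
    L.foldl
      (fun st d =>
        if PySem.Int.mod dividend d = 0 then
          ndUpd divisor (ndUpd divisor st d) (PySem.Int.floordiv dividend d)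
        else st) st
    = (L.flatMap
        (fun d => if PySem.Int.mod dividend d = 0 then [d, PySem.Int.floordiv dividend d] else [])).foldl
        (ndUpd divisor) st := by
  induction L generalizing st with
  | nil => rfl
  | cons x L ih =>
    by_cases h : PySem.Int.mod dividend x = 0 <;>
      simp [List.flatMap_cons, h, ih, List.foldl]

-- a fold of ndUpd splits into the two accumulator folds over the two filters
theorem ndUpd_fold_split (divisor : Int) (C : List Int) (lo hi : Option Int) :
    C.foldl (ndUpd divisor) (lo, hi)
    = ((C.filter (fun v => decide (v < divisor))).foldl ndOptMax lo,
       (C.filter (fun v => !decide (v < divisor))).foldl ndOptMin hi) := by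
  induction C generalizing lo hi with
  | nil => rfl
  | cons v C ih =>
    by_cases h : v < divisor <;>
      simp [List.foldl, ndUpd, h, ih]

theorem ndOptMax_some_spec (l : List Int) (a : Int) :
    ∃ m, l.foldl ndOptMax (some a) = some m ∧ (m = a ∨ m ∈ l) ∧ a ≤ m ∧ ∀ x ∈ l, x ≤ m := by
  induction l generalizing a with
  | nil => exact ⟨a, rfl, Or.inl rfl, le_refl a, by simp⟩
  | cons x l ih =>
    have hstep : ndOptMax (some a) x = some (if a < x then x else a) := by by_cases h : a < x <;> simp [ndOptMax, h]
    obtain ⟨m, hm, hmem, hle, hub⟩ := ih (if a < x then x else a)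
    refine ⟨m, by simpa [List.foldl, hstep] using hm, ?_, ?_, ?_⟩
    · rcases hmem with h | h
      · split at h <;> simp [h]
      · simp [h]
    · split at hle <;> omega
    · intro y hy
      rcases List.mem_cons.mp hy with rfl | hy
      · have : y ≤ (if a < y then y else a) := by split <;> omega
        omega
      · exact hub y hy

theorem ndOptMin_some_spec (l : List Int) (a : Int) :
    ∃ m, l.foldl ndOptMin (some a) = some m ∧ (m = a ∨ m ∈ l) ∧ m ≤ a ∧ ∀ x ∈ l, m ≤ x := by
  induction l generalizing a with
  | nil => exact ⟨a, rfl, Or.inl rfl, le_refl a, by simp⟩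
  | cons x l ih =>
    have hstep : ndOptMin (some a) x = some (if x < a then x else a) := by by_cases h : x < a <;> simp [ndOptMin, h]
    obtain ⟨m, hm, hmem, hle, hub⟩ := ih (if x < a then x else a)
    refine ⟨m, by simpa [List.foldl, hstep] using hm, ?_, ?_, ?_⟩
    · rcases hmem with h | h
      · split at h <;> simp [h]
      · simp [h]
    · split at hle <;> omega
    · intro y hy
      rcases List.mem_cons.mp hy with rfl | hy
      · have : (if y < a then y else a) ≤ y := by split <;> omega
        omega
      · exact hub y hy

theorem foldl_ndOptMax_eq_some (l : List Int) (m : Int) (h1 : m ∈ l) (h2 : ∀ x ∈ l, x ≤ m) :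
    l.foldl ndOptMax none = some m := by
  cases l with
  | nil => cases h1
  | cons a l =>
    obtain ⟨m', hm', hmem, hle, hub⟩ := ndOptMax_some_spec l a
    have hm'l : m' ∈ a :: l := by rcases hmem with h | h <;> simp [h]
    have h1' : m' ≤ m := h2 m' hm'l
    have h2' : m ≤ m' := by
      rcases List.mem_cons.mp h1 with rfl | h
      · exact hle
      · exact hub m h
    have : m' = m := le_antisymm h1' h2'
    simpa [List.foldl, this] using hm'

theorem foldl_ndOptMin_eq_some (l : List Int) (m : Int) (h1 : m ∈ l) (h2 : ∀ x ∈ l, m ≤ x) :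
    l.foldl ndOptMin none = some m := by
  cases l with
  | nil => cases h1
  | cons a l =>
    obtain ⟨m', hm', hmem, hle, hub⟩ := ndOptMin_some_spec l a
    have hm'l : m' ∈ a :: l := by rcases hmem with h | h <;> simp [h]
    have h1' : m ≤ m' := h2 m' hm'l
    have h2' : m' ≤ m := by
      rcases List.mem_cons.mp h1 with rfl | h
      · exact hle
      · exact hub m h
    have : m' = m := le_antisymm h2' h1'
    simpa [List.foldl, this] using hm'

-- the main equality
theorem nd_main (divisor dividend : Int) :
    nearest_divisors divisor dividend = nearest_divisors_alt divisor dividend := by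
  unfold nearest_divisors nearest_divisors_alt
  dsimp only
  rw [nd_set_fold, nd_alt_fold, ndUpd_fold_split]
  set r : Int := (Nat.sqrt dividend.toNat : Int) with hr
  set C : List Int :=
    (PySem.List.pyRange 1 (r + 1) 1).flatMap
      (fun d => if PySem.Int.mod dividend d = 0 then [d, PySem.Int.floordiv dividend d] else [])
    with hC
  have hofl : C.foldl PySem.Set.add PySem.Set.empty = PySem.Set.ofList C := rfl
  rw [hofl]
  set L : List Int := PySem.List.sorted (PySem.Set.ofList C) (fun x => x) false with hL
  have hpl : L.Pairwise (· < ·) := PySem.List.sorted_ofList_pairwise_lt C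
  have hple : L.Pairwise (· ≤ ·) := hpl.imp (fun h => le_of_lt h)
  have hmem : ∀ x, x ∈ L ↔ x ∈ C := fun x =>
    (PySem.List.mem_sorted _ _ _ _).trans (PySem.Set.mem_ofList C x)
  set i : Nat := PySem.List.bisectLeft L divisor with hi
  obtain ⟨hil, hlo, hhi⟩ := PySem.List.bisectLeft_spec L divisor hple
  have hmono : ∀ (p q : Nat) (hpq : p ≤ q) (hq : q < L.length), L[p]'(lt_of_le_of_lt hpq hq) ≤ L[q] := by
    intro p q hpq hq
    exact PySem.List.sorted_id_getElem_mono (PySem.Set.ofList C) hpq hq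
  refine Prod.ext ?_ ?_
  · -- lower component
    show (if 0 < i ∧ PySem.List.pyGetD L ((i : Int) - 1) 0 ≤ divisor then
            some (PySem.List.pyGetD L ((i : Int) - 1) 0) else none)
        = (C.filter (fun v => decide (v < divisor))).foldl ndOptMax none
    by_cases h0 : 0 < i
    · have hilen : i - 1 < L.length := by omega
      have hcast : (i : Int) - 1 = ((i - 1 : Nat) : Int) := by omega
      have hgd : PySem.List.pyGetD L ((i : Int) - 1) 0 = L[i - 1] := by
        rw [hcast, PySem.List.pyGetD_natCast, List.getD_eq_getElem _ _ hilen]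
      have hmlt : L[i - 1] < divisor := hlo (i - 1) hilen (by omega)
      rw [hgd, if_pos ⟨h0, le_of_lt hmlt⟩]
      refine (foldl_ndOptMax_eq_some _ _ ?_ ?_).symm
      · exact List.mem_filter.mpr ⟨(hmem _).mp (List.getElem_mem hilen), by simpa using hmlt⟩
      · intro x hx
        obtain ⟨hxC, hxlt⟩ := List.mem_filter.mp hx
        obtain ⟨j, hj, hxj⟩ := List.mem_iff_getElem.mp ((hmem x).mpr hxC)
        have hxlt' : x < divisor := by simpa using hxlt
        have hji : j < i := by
          by_contra hcon
          exact absurd (hxj ▸ hhi j hj (by omega)) (by omega)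
        exact hxj ▸ hmono j (i - 1) (by omega) hilen
    · rw [if_neg (by simp [h0])]
      have hnil : C.filter (fun v => decide (v < divisor)) = [] := by
        rw [List.filter_eq_nil_iff]
        intro x hxC
        obtain ⟨j, hj, hxj⟩ := List.mem_iff_getElem.mp ((hmem x).mpr hxC)
        have := hhi j hj (by omega)
        simp only [decide_eq_true_eq]
        omega
      rw [hnil]
      rfl
  · -- upper component
    show (if (i : Int) < PySem.List.len L then some (PySem.List.pyGetD L (i : Int) 0) else none)
        = (C.filter (fun v => !decide (v < divisor))).foldl ndOptMin none
    rw [PySem.List.len_eq]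
    by_cases hlt : i < L.length
    · have hgd : PySem.List.pyGetD L (i : Int) 0 = L[i] := by
        rw [PySem.List.pyGetD_natCast, List.getD_eq_getElem _ _ hlt]
      have hdle : divisor ≤ L[i] := hhi i hlt (le_refl i)
      rw [if_pos (by exact_mod_cast hlt), hgd]
      refine (foldl_ndOptMin_eq_some _ _ ?_ ?_).symm
      · refine List.mem_filter.mpr ⟨(hmem _).mp (List.getElem_mem hlt), ?_⟩
        simp only [Bool.not_eq_true', decide_eq_false_iff_not]
        omega
      · intro x hx
        obtain ⟨hxC, hxge⟩ := List.mem_filter.mp hx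
        obtain ⟨j, hj, hxj⟩ := List.mem_iff_getElem.mp ((hmem x).mpr hxC)
        have hxge' : ¬ x < divisor := by simpa using hxge
        have hij : i ≤ j := by
          by_contra hcon
          exact absurd (hxj ▸ hlo j hj (by omega)) (by omega)
        exact hxj ▸ hmono i j hij hj
    · rw [if_neg (by exact_mod_cast hlt)]
      have hnil : C.filter (fun v => !decide (v < divisor)) = [] := by
        rw [List.filter_eq_nil_iff]
        intro x hxC
        obtain ⟨j, hj, hxj⟩ := List.mem_iff_getElem.mp ((hmem x).mpr hxC)
        have := hlo j hj (by omega)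
        simp only [Bool.not_eq_true', decide_eq_false_iff_not]
        omega
      rw [hnil]
      rfl

-- ===== VERDICT (by name: the statement is the Claim_ definition above) =====
theorem nearest_divisors_spec : Claim_equal_nearest_divisors := by
  intro divisor dividend _ _
  unfold Spec_nearest_divisors
  exact nd_main divisor dividend
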